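-- pv_equiv track=rewrite | github.com/eshanking/fears | figure_code/old_code/time_between_doses.py | max_time_between_doses
-- ===== SOURCE A (Python) =====
-- def max_time_between_doses(regimen):
--     last_dose = 0
--     max_interval = 0
--     for i in range(len(regimen)):
--         if regimen[i] == 1:
--             interval = i-last_dose
--             if interval > max_interval:
--                 max_interval = interval
--             last_dose = i
--     return max_interval
-- ===== SOURCE B (Python) =====
-- def max_time_between_doses(regimen):
--     positions = [0] + [i for i, v in enumerate(regimen) if v == 1]
--     return max((b - a for a, b in zip(positions, positions[1:])), default=0)
-- ===== Notes on version B (the rewrite author's own statement) =====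
-- stated objective: alternative
-- what changed: Replaces the single stateful scan (last_dose/max_interval accumulators over every index) by a two-phase decomposition: first build the list of dose positions (with 0 prepended), then take the max of consecutive differences over just those positions.
import Mathlib
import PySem

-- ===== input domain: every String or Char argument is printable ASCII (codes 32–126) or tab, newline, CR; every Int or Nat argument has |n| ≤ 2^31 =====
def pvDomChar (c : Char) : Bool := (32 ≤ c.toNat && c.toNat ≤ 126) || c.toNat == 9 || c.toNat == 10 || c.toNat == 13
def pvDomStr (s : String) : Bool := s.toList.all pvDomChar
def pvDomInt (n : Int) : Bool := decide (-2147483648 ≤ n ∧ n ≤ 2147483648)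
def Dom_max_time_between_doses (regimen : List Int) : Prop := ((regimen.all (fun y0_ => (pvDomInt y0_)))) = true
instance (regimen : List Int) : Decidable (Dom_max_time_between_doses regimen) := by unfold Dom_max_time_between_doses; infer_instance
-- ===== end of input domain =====

-- B replaces A's single stateful scan by a two-phase decomposition (collect dose positions, then max of consecutive differences); no speed claim, same O(n) cost.


-- ===== PORT A =====
-- for i in range(len(regimen)): if regimen[i] == 1: update (last_dose, max_interval)
def max_time_between_doses (regimen : List Int) : Int :=
  let s := (PySem.List.pyRange 0 (PySem.List.len regimen)).foldl
    (fun (s : Int × Int) i =>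
      if PySem.List.pyGetD regimen i 0 == 1 then
        let interval := i - s.1
        (i, if interval > s.2 then interval else s.2)
      else s) (0, 0)
  s.2

-- ===== PORT B =====
-- positions = [0] + [i for i, v in enumerate(regimen) if v == 1]
-- max((b - a for a, b in zip(positions, positions[1:])), default=0)
def max_time_between_doses_alt (regimen : List Int) : Int :=
  let positions : List Int :=
    0 :: ((PySem.List.enumerate regimen).filter (fun p => p.2 == 1)).map (fun p => p.1)
  PySem.List.maxD ((positions.zip positions.tail).map (fun p => p.2 - p.1)) (fun y => y) 0

-- ===== PRECONDITION & SPEC =====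
def Spec_max_time_between_doses (regimen : List Int) (out : Int) : Prop := out = max_time_between_doses_alt regimen
instance (regimen : List Int) (out : Int) : Decidable (Spec_max_time_between_doses regimen out) := by unfold Spec_max_time_between_doses; infer_instance

-- ===== CLAIM (what is proved, stated in full; the proofs are below) =====
def Claim_equal_max_time_between_doses : Prop := ∀ (regimen : List Int), Dom_max_time_between_doses regimen → Spec_max_time_between_doses regimen (max_time_between_doses regimen)

-- ===== LEMMAS AND PROOFS =====

-- A's loop state update, as a named step function (for the lemmas below).
def pvStepA (s : Int × Int) (i : Int) : Int × Int :=
  (i, if i - s.1 > s.2 then i - s.1 else s.2)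

-- A's accumulator fold over any position list equals the running max of consecutive differences.
theorem pv_fold_eq (ps : List Int) : ∀ (l m : Int),
    (ps.foldl pvStepA (l, m)).2
      = (((l :: ps).zip ps).map (fun p => p.2 - p.1)).foldl max m := by
  induction ps with
  | nil => intro l m; simp
  | cons i t ih =>
    intro l m
    simp only [List.foldl_cons, List.zip_cons_cons, List.map_cons]
    have h : pvStepA (l, m) i = (i, max m (i - l)) := by
      simp [pvStepA, max_def]; split_ifs <;> omega
    rw [h, ih i]

-- Elements of the filtered enumerate are nonnegative indices.
theorem pv_pos_nonneg (regimen : List Int) :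
    ∀ x ∈ ((PySem.List.enumerate regimen).filter (fun p => p.2 == 1)).map
        (fun p : Int × Int => p.1), 0 ≤ x := by
  intro x hx
  simp only [List.mem_map, List.mem_filter] at hx
  obtain ⟨p, ⟨hp, _⟩, rfl⟩ := hx
  rw [PySem.List.enumerate_eq_map_pyRange regimen 0] at hp
  simp only [List.mem_map] at hp
  obtain ⟨j, hj, rfl⟩ := hp
  exact (PySem.List.mem_pyRange_one.mp hj).1

-- ===== VERDICT (by name: the statement is the Claim_ definition above) =====
theorem max_time_between_doses_spec : Claim_equal_max_time_between_doses := by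
  intro regimen _
  unfold Spec_max_time_between_doses max_time_between_doses max_time_between_doses_alt
  -- rewrite A's loop as a fold over the filtered index list
  have hA : (PySem.List.pyRange 0 (PySem.List.len regimen)).foldl
      (fun (s : Int × Int) i =>
        if PySem.List.pyGetD regimen i 0 == 1 then
          let interval := i - s.1
          (i, if interval > s.2 then interval else s.2)
        else s) (0, 0)
      = ((PySem.List.pyRange 0 (PySem.List.len regimen)).filter
          (fun i => PySem.List.pyGetD regimen i 0 == 1)).foldl pvStepA (0, 0) := by
    rw [List.foldl_filter]
    rfl
  -- B's position tail equals the same filtered index list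
  have hB : ((PySem.List.enumerate regimen).filter (fun p => p.2 == 1)).map
        (fun p : Int × Int => p.1)
      = (PySem.List.pyRange 0 (PySem.List.len regimen)).filter
          (fun i => PySem.List.pyGetD regimen i 0 == 1) := by
    rw [PySem.List.enumerate_eq_map_pyRange regimen 0, List.filter_map, List.map_map]
    simp [Function.comp_def]
  have hnn := pv_pos_nonneg regimen
  rw [hB] at hnn
  simp only [hA, hB]
  revert hnn
  generalize (PySem.List.pyRange 0 (PySem.List.len regimen)).filter
      (fun i => PySem.List.pyGetD regimen i 0 == 1) = P
  intro hnn
  rw [pv_fold_eq P 0 0]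
  cases P with
  | nil => decide
  | cons q qs =>
    have hq : 0 ≤ q := hnn q List.mem_cons_self
    show List.foldl max 0 (((0 :: q :: qs).zip (q :: qs)).map (fun p => p.2 - p.1))
        = PySem.List.maxD (((0 :: q :: qs).zip ((0 : Int) :: q :: qs).tail).map (fun p => p.2 - p.1)) (fun y => y) 0
    simp only [List.tail_cons, List.zip_cons_cons, List.map_cons]
    rw [PySem.List.maxD, PySem.List.max?_id_cons, Option.getD_some, List.foldl_cons]
    have h1 : max (0 : Int) (q - 0) = q - 0 := by omega
    rw [h1]
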